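-- pv_equiv track=rewrite | github.com/ErfanShahbazzadeh/Compiler | Lexical Analysis/Lexical Analysis.py | Assignment_checker
-- ===== SOURCE A (Python) =====
-- def Assignment_checker(lexeme):
--     state = 1
--     flag = False
--     for ch in lexeme:
--         match state:
--             case 1:
--                 if ch == "<":
--                     state = 2
--                 else:
--                     return False
--             case 2:
--                 if ch == "-":
--                     state = 3
--                 else:
--                     return False
--             case 3:
--                 if ch == "-":
--                     flag = True
--                     state = 4
--                 else:
--                     return False
--             case 4:
--                 if 'a' <= ch <= 'z' or 'A' <= ch <= 'Z' or ch == "_" or "0" <= ch <= "9":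
--                     return False
--     if flag:
--         return True
-- ===== SOURCE B (Python) =====
-- def Assignment_checker(lexeme):
--     if not lexeme.startswith("<--"):
--         return False
--     return not any('a' <= ch <= 'z' or 'A' <= ch <= 'Z' or ch == '_'
--                    or '0' <= ch <= '9' for ch in lexeme[3:])
-- ===== Notes on version B (the rewrite author's own statement) =====
-- stated objective: simpler
-- what changed: Replaced the DFA with explicit state and flag variables by a startswith check of the fixed head '<--' followed by an any-scan of the tail for word characters; Pre_ excludes the proper prefixes '', '<' and '<-' of the head, on which A falls off its loop and implicitly returns None instead of a bool, while B returns False.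
-- outside the precondition, e.g. on Assignment_checker(''): A returns None, B returns False; on Assignment_checker('<'): A returns None, B returns False; on Assignment_checker('<-'): A returns None, B returns False
import Mathlib
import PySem

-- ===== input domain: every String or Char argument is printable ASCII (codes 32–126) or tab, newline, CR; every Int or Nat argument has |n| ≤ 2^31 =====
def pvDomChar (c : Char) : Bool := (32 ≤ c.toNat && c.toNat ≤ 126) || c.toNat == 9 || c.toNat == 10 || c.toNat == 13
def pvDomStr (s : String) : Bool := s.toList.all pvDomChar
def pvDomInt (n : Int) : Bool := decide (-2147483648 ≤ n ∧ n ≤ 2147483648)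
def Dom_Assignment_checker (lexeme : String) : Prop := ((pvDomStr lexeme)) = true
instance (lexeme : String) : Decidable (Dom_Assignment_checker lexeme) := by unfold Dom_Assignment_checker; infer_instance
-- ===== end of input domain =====

-- B replaces A's DFA (state/flag variables) by a startswith check of the fixed head "<--" plus an any-scan of the tail; simpler.

-- ===== PORT A =====
-- the for-loop of A: recursion over the characters carrying (state, flag); each `return` yields `some _`, falling off the loop reaches the trailing `if flag` test
def pvLoopA : List Char → Int → Bool → Option Bool
  | [], _, flag => if flag then some true else none
  | ch :: rest, state, flag =>
    if state = 1 then
      (if ch = '<' then pvLoopA rest 2 flag else some false)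
    else if state = 2 then
      (if ch = '-' then pvLoopA rest 3 flag else some false)
    else if state = 3 then
      (if ch = '-' then pvLoopA rest 4 true else some false)
    else if state = 4 then
      (if ('a' ≤ ch ∧ ch ≤ 'z') ∨ ('A' ≤ ch ∧ ch ≤ 'Z') ∨ ch = '_' ∨ ('0' ≤ ch ∧ ch ≤ '9')
       then some false else pvLoopA rest state flag)
    else pvLoopA rest state flag  -- no case matches: loop continues (unreachable)

def Assignment_checker (lexeme : String) : Option Bool :=
  pvLoopA lexeme.toList 1 false

-- ===== PORT B =====
-- word-character test of B's any-scan (the same explicit class as in the Python)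
def pvIsWordChar (ch : Char) : Bool :=
  ('a' ≤ ch && ch ≤ 'z') || ('A' ≤ ch && ch ≤ 'Z') || ch == '_' || ('0' ≤ ch && ch ≤ '9')

def Assignment_checker_alt (lexeme : String) : Option Bool :=
  if ¬ PySem.Str.startswith lexeme "<--" then some false
  else some (!((PySem.Str.slice lexeme (some 3) none).toList.any pvIsWordChar))

-- ===== PRECONDITION & SPEC =====
-- Pre_ excludes exactly the proper prefixes "" , "<" , "<-" of the head "<--": there A falls
-- off its loop with flag = False and implicitly returns None (no bool), while B returns False.
def Pre_Assignment_checker (lexeme : String) : Prop :=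
  lexeme ≠ "" ∧ lexeme ≠ "<" ∧ lexeme ≠ "<-"
instance (lexeme : String) : Decidable (Pre_Assignment_checker lexeme) := by
  unfold Pre_Assignment_checker; infer_instance
def pvWitness_Assignment_checker : String := "<--"

def Spec_Assignment_checker (lexeme : String) (out : Option Bool) : Prop := out = Assignment_checker_alt lexeme
instance (lexeme : String) (out : Option Bool) : Decidable (Spec_Assignment_checker lexeme out) := by unfold Spec_Assignment_checker; infer_instance

-- ===== CLAIM =====
def Claim_equal_Assignment_checker : Prop := ∀ (lexeme : String), Dom_Assignment_checker lexeme → Pre_Assignment_checker lexeme → Spec_Assignment_checker lexeme (Assignment_checker lexeme)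

-- ===== LEMMAS AND PROOFS =====
theorem pvLoopA_state4 (rest : List Char) :
    pvLoopA rest 4 true = (if rest.any pvIsWordChar then some false else some true) := by
  induction rest with
  | nil => simp [pvLoopA]
  | cons c cs ih =>
    simp only [pvLoopA, List.any_cons]
    by_cases h : ('a' ≤ c ∧ c ≤ 'z') ∨ ('A' ≤ c ∧ c ≤ 'Z') ∨ c = '_' ∨ ('0' ≤ c ∧ c ≤ '9')
    · have hw : pvIsWordChar c = true := by simp [pvIsWordChar]; tauto
      simp [h, hw]
    · have hw : pvIsWordChar c = false := by push Not at h; simp [pvIsWordChar]; tauto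
      simp [h, hw, ih]

theorem alt_toList (lexeme : String) :
    Assignment_checker_alt lexeme =
      (if ¬ (['<', '-', '-'] <+: lexeme.toList) then some false
       else some (!((lexeme.toList.drop 3).any pvIsWordChar))) := by
  unfold Assignment_checker_alt
  have hs : PySem.Str.startswith lexeme "<--" = PySem.Chars.startswith lexeme.toList ['<', '-', '-'] := by
    simp [PySem.Str.startswith_eq]
  have hsl : (PySem.Str.slice lexeme (some 3) none).toList = lexeme.toList.drop 3 := by
    rw [PySem.Str.toList_slice, PySem.Chars.slice_eq_listSlice,
      show (3 : Int) = ((3 : Nat) : Int) from rfl, PySem.List.slice_from_natCast]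
  rw [hs, hsl]
  by_cases h : ['<', '-', '-'] <+: lexeme.toList
  · rw [if_neg (by simp [PySem.Chars.startswith_iff, h]), if_neg (by simp [h])]
  · rw [if_pos (by simp [PySem.Chars.startswith_iff, h]), if_pos (by simp [h])]

-- ===== VERDICT =====
theorem Assignment_checker_spec : Claim_equal_Assignment_checker := by
  intro lexeme _ hpre
  obtain ⟨h0, h1, h2⟩ := hpre
  have t0 : lexeme.toList ≠ [] := fun h => h0 (by
    rw [← String.ofList_toList (s := lexeme), h])
  have t1 : lexeme.toList ≠ ['<'] := fun h => h1 (by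
    rw [← String.ofList_toList (s := lexeme), h])
  have t2 : lexeme.toList ≠ ['<', '-'] := fun h => h2 (by
    rw [← String.ofList_toList (s := lexeme), h])
  unfold Spec_Assignment_checker Assignment_checker
  rw [alt_toList]
  match hcs : lexeme.toList with
  | [] => exact absurd hcs t0
  | [a] =>
    by_cases h : a = '<'
    · exact absurd (by rw [hcs, h]) t1
    · simp [pvLoopA, h, @eq_comm Char '<' a, List.cons_prefix_cons]
  | [a, b] =>
    by_cases h : a = '<' <;> by_cases h' : b = '-'
    · exact absurd (by rw [hcs, h, h']) t2
    all_goals simp [pvLoopA, h, h', @eq_comm Char '<' a, @eq_comm Char '-' b, List.cons_prefix_cons]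
  | a :: b :: c :: rest =>
    by_cases h : a = '<' <;> by_cases h' : b = '-' <;> by_cases h'' : c = '-' <;>
      simp [pvLoopA, h, h', h'', @eq_comm Char '<' a, @eq_comm Char '-' b, @eq_comm Char '-' c, List.cons_prefix_cons, pvLoopA_state4] <;>
      (try simp only [← List.any_eq_true]) <;>
      cases hr : rest.any pvIsWordChar <;> simp [hr]
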